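-- pv_equiv track=rewrite | github.com/Spawn12/Python_Basics | list_manupalation.py | func
-- ===== SOURCE A (Python) =====
-- def func(a,b):
--     list=[]
--     y=0
--     for x in range(a,b):
--         if x%2==0:
--             y=y+x
--             list.append(x)
--     return list,"Sum of all no in list : ",y
-- ===== SOURCE B (Python) =====
-- def func(a, b):
--     start = a if a % 2 == 0 else a + 1
--     lst = list(range(start, b, 2))
--     if lst:
--         s = len(lst) * (lst[0] + lst[-1]) // 2
--     else:
--         s = 0
--     return lst, "Sum of all no in list : ", s
-- ===== Notes on version B (the rewrite author's own statement) =====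
-- stated objective: faster
-- what changed: B builds the even list directly with a stride-2 range (no per-element modulo test) and computes the sum by the closed-form arithmetic-series formula n*(first+last)//2 instead of accumulating in the loop.
import Mathlib
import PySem

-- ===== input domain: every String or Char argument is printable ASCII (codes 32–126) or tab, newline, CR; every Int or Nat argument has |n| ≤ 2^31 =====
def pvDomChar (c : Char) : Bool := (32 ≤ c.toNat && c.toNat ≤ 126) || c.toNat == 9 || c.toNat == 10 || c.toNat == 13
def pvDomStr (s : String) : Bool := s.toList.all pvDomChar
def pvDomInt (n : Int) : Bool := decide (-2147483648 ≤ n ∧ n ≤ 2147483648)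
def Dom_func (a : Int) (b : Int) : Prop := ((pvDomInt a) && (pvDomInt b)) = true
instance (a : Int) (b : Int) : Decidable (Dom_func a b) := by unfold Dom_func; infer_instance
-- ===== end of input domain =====

-- B replaces A's per-element even test and running sum by a stride-2 range and the
-- closed-form arithmetic-series sum n*(first+last)//2 (objective: faster, constant-factor).

-- ===== PORT A =====
def func (a : Int) (b : Int) : List Int × String × Int :=
  let st := (PySem.List.pyRange a b 1).foldl
    (fun (s : List Int × Int) x =>
      if PySem.Int.mod x 2 = 0 then (s.1 ++ [x], s.2 + x) else s) ([], 0)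
  (st.1, "Sum of all no in list : ", st.2)

-- ===== PORT B =====
def func_alt (a : Int) (b : Int) : List Int × String × Int :=
  let start := if PySem.Int.mod a 2 = 0 then a else a + 1
  let lst := PySem.List.pyRange start b 2
  let s := if lst = [] then 0
           else PySem.Int.floordiv ((lst.length : Int) *
                  (PySem.List.pyGetD lst 0 0 + PySem.List.pyGetD lst (-1) 0)) 2
  (lst, "Sum of all no in list : ", s)

-- ===== PRECONDITION & SPEC =====
def Spec_func (a : Int) (b : Int) (out : List Int × String × Int) : Prop := out = func_alt a b
instance (a : Int) (b : Int) (out : List Int × String × Int) : Decidable (Spec_func a b out) := by unfold Spec_func; infer_instance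

-- ===== CLAIM (what is proved, stated in full; the proofs are below) =====
def Claim_equal_func : Prop := ∀ (a : Int) (b : Int), Dom_func a b → Spec_func a b (func a b)

-- ===== LEMMAS AND PROOFS =====

-- A's loop appends each even x and adds it to the running sum: it is filter + sum.
lemma loopA (l : List Int) (acc : List Int) (y : Int) :
    l.foldl (fun (s : List Int × Int) x =>
      if PySem.Int.mod x 2 = 0 then (s.1 ++ [x], s.2 + x) else s) (acc, y)
    = (acc ++ l.filter (fun x => decide (PySem.Int.mod x 2 = 0)),
       y + (l.filter (fun x => decide (PySem.Int.mod x 2 = 0))).sum) := by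
  induction l generalizing acc y with
  | nil => simp
  | cons h t ih =>
    rw [List.foldl_cons, List.filter_cons]
    by_cases hh : PySem.Int.mod h 2 = 0
    · rw [if_pos hh, ih, decide_eq_true hh, if_pos rfl]
      simp [add_assoc]
    · rw [if_neg hh, ih, decide_eq_false hh]
      simp

lemma pyRange_pairwise (a b s : Int) (hs : 0 < s) :
    (PySem.List.pyRange a b s).Pairwise (· < ·) := by
  rw [PySem.List.pyRange_of_pos a b hs]
  refine List.pairwise_map.mpr ?_
  refine List.pairwise_lt_range.imp ?_
  intro i j hij
  have : (i:Int) < j := by exact_mod_cast hij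
  nlinarith

-- The evens of range(a,b) are exactly range(start,b,2): both lists are strictly
-- increasing with the same membership, hence equal.
lemma filter_evens (a b : Int) :
    (PySem.List.pyRange a b 1).filter (fun x => decide (PySem.Int.mod x 2 = 0))
    = PySem.List.pyRange (if PySem.Int.mod a 2 = 0 then a else a + 1) b 2 := by
  set st := if PySem.Int.mod a 2 = 0 then a else a + 1 with hst
  have hstp : a ≤ st ∧ st ≤ a + 1 ∧ 2 ∣ st := by
    by_cases h : PySem.Int.mod a 2 = 0
    · have := (PySem.Int.mod_eq_zero_iff_dvd a 2).mp h
      rw [hst, if_pos h]; omega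
    · have hnd : ¬ (2 ∣ a) := fun hd => h ((PySem.Int.mod_eq_zero_iff_dvd a 2).mpr hd)
      rw [hst, if_neg h]; omega
  apply List.eq_of_perm_of_sorted (le := (· < ·))
  · intro x y _ _ h1 h2; omega
  · exact (pyRange_pairwise a b 1 (by norm_num)).filter _
  · exact pyRange_pairwise st b 2 (by norm_num)
  · refine (List.perm_ext_iff_of_nodup ?_ ?_).mpr ?_
    · exact ((pyRange_pairwise a b 1 (by norm_num)).filter _).nodup
    · exact (pyRange_pairwise st b 2 (by norm_num)).nodup
    · intro x
      simp only [List.mem_filter, PySem.List.mem_pyRange_iff_of_pos (by norm_num : (0:Int) < 1),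
        PySem.List.mem_pyRange_iff_of_pos (by norm_num : (0:Int) < 2), decide_eq_true_eq,
        PySem.Int.mod_eq_zero_iff_dvd]
      omega

lemma sum_map_range (st : Int) (n : Nat) :
    (List.map (fun k : Nat => st + 2 * (k:Int)) (List.range n)).sum = n * st + n * (n - 1) := by
  induction n with
  | zero => simp
  | succ m ih =>
    rw [List.range_succ, List.map_append, List.sum_append, ih]
    simp only [List.map_cons, List.map_nil, List.sum_cons, List.sum_nil]
    push_cast; ring

lemma sum_closed_aux (st : Int) (n : Nat) :
    (List.map (fun k : Nat => st + 2 * (k:Int)) (List.range n)).sum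
    = (if List.map (fun k : Nat => st + 2 * (k:Int)) (List.range n) = [] then 0
       else PySem.Int.floordiv (((List.map (fun k : Nat => st + 2 * (k:Int)) (List.range n)).length : Int) *
         (PySem.List.pyGetD (List.map (fun k : Nat => st + 2 * (k:Int)) (List.range n)) 0 0 +
          PySem.List.pyGetD (List.map (fun k : Nat => st + 2 * (k:Int)) (List.range n)) (-1) 0)) 2) := by
  rcases Nat.eq_zero_or_pos n with h0 | hpos
  · simp [h0]
  · have hne : List.map (fun k : Nat => st + 2 * (k:Int)) (List.range n) ≠ [] := by
      simp only [ne_eq, List.map_eq_nil_iff, List.range_eq_nil]; omega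
    rw [if_neg hne]
    have hlen : (List.map (fun k : Nat => st + 2 * (k:Int)) (List.range n)).length = n := by simp
    have hget0 : PySem.List.pyGetD (List.map (fun k : Nat => st + 2 * (k:Int)) (List.range n)) 0 0 = st := by
      rw [PySem.List.pyGetD_of_nonneg _ _ (by norm_num)]
      have := PySem.List.getD_map_range (fun k : Nat => st + 2 * (k:Int)) n 0 0 hpos
      simpa using this
    have hgetlast : PySem.List.pyGetD (List.map (fun k : Nat => st + 2 * (k:Int)) (List.range n)) (-1) 0
        = st + 2 * ((n:Int) - 1) := by
      simp only [PySem.List.pyGetD, PySem.List.pyGet?, PySem.List.pyIdx?, hlen]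
      rw [if_neg (by norm_num : ¬ ((0:Int) ≤ -1)), if_pos (by omega : -(n:Int) ≤ -1)]
      rw [show (-(-1:Int)).toNat = 1 by norm_num]
      simp only [Option.bind_some]
      rw [List.getElem?_eq_getElem (by simpa using (by omega : n - 1 < n))]
      simp only [List.getElem_map, List.getElem_range, Option.getD_some]
      have : ((n - 1 : Nat) : Int) = (n:Int) - 1 := by omega
      rw [this]
    rw [sum_map_range, hlen, hget0, hgetlast]
    rw [show ((n:Int)) * (st + (st + 2 * ((n:Int) - 1))) = ((n:Int) * st + (n:Int) * ((n:Int) - 1)) * 2 by ring]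
    rw [PySem.Int.floordiv_eq_ediv_of_pos (by norm_num), Int.mul_ediv_cancel _ (by norm_num)]

-- The sum of range(st,b,2) equals B's closed-form expression.
lemma sum_closed (st b : Int) :
    (PySem.List.pyRange st b 2).sum
    = (if PySem.List.pyRange st b 2 = [] then 0
       else PySem.Int.floordiv (((PySem.List.pyRange st b 2).length : Int) *
         (PySem.List.pyGetD (PySem.List.pyRange st b 2) 0 0 +
          PySem.List.pyGetD (PySem.List.pyRange st b 2) (-1) 0)) 2) := by
  rw [PySem.List.pyRange_of_pos st b (by norm_num)]
  exact sum_closed_aux st _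

-- ===== VERDICT (by name: the statement is the Claim_ definition above) =====
theorem func_spec : Claim_equal_func := by
  intro a b _
  unfold Spec_func func func_alt
  rw [loopA, filter_evens]
  simp only [List.nil_append, zero_add]
  rw [sum_closed]
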